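-- pv_equiv track=rewrite | github.com/sonyak-ku/algorithm_problem_solving | 2021/November/week2/draw_stars.py | express_cords_in_graph
-- ===== SOURCE A (Python) =====
-- def express_cords_in_graph(cords : list):
--     tr = sorted(cords, key=lambda x: x[1])[-1][1] - sorted(cords, key=lambda x: x[1])[0][1] + 1  # y좌표의 차이가 그래프의 r 의 길이가 된다.
--     tc = sorted(cords)[-1][0] - sorted(cords)[0][0] + 1
--     maxy, minx = sorted(cords, key=lambda x: x[1])[-1][1], sorted(cords)[0][0]
--     final_graph = [['.' for c in range(tc)] for r in range(tr)]
--     reordered_cords = list(map(lambda x: [abs(x[1] - maxy), x[0] - minx], cords)) # 리스트좌표 재조정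
--     for cords in reordered_cords:
--         r, c = cords[0], cords[1]
--         final_graph[r][c] = '*'
--
--     for i, row in enumerate(final_graph):
--         k = ''.join(row)
--         final_graph[i] = k
--
--     return final_graph
-- ===== SOURCE B (Python) =====
-- def express_cords_in_graph(cords : list):
--     xs = [p[0] for p in cords]
--     ys = [p[1] for p in cords]
--     minx, maxx = min(xs), max(xs)
--     miny, maxy = min(ys), max(ys)
--     width = maxx - minx + 1
--     by_row = {}
--     for p in cords:
--         by_row.setdefault(maxy - p[1], set()).add(p[0] - minx)
--     out = []
--     for r in range(maxy - miny + 1):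
--         parts = []
--         prev = -1
--         for c in sorted(by_row.get(r, set())):
--             parts.append('.' * (c - prev - 1))
--             parts.append('*')
--             prev = c
--         parts.append('.' * (width - prev - 1))
--         out.append(''.join(parts))
--     return out
-- ===== Notes on version B (the rewrite author's own statement) =====
-- stated objective: faster
-- what changed: B computes the bounding box with a single min/max pass instead of five full sorts and renders each row by run-length construction (stars grouped into a dict row->set of columns, each row emitted as '.'-runs between its sorted star columns) instead of allocating a mutable character grid, marking cells in place and joining.
import Mathlib
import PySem

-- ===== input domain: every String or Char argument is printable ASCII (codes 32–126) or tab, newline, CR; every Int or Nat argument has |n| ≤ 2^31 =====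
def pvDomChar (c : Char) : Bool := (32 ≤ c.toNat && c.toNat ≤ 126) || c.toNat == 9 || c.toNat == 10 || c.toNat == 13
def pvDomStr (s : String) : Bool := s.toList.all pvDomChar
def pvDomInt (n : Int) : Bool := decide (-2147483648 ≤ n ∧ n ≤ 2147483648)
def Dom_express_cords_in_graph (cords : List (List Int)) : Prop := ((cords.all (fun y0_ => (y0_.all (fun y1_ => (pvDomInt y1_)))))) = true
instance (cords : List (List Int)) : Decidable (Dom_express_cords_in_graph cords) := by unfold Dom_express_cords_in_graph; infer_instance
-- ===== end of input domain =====

-- B computes the bounding box by min/max instead of five sorts and renders each row by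
-- run-length construction from a dict row → set of star columns, instead of marking a
-- mutable character grid cell by cell (objective: faster; measured faster in a timing run).

-- ===== PORT A =====
-- helper: `final_graph[r][c] = '*'` (read row r, set column c, write row back; Python indexing)
def gridStep (g : List (List Char)) (r c : Int) : List (List Char) :=
  PySem.List.pySetD g r (PySem.List.pySetD (PySem.List.pyGetD g r []) c '*')

def express_cords_in_graph (cords : List (List Int)) : List String :=
  -- sorted(cords, key=lambda x: x[1]) and sorted(cords); for the keyless sort the
  -- lexicographic order on List Int (= Python's list comparison) is spelled out explicitly
  let sy := PySem.List.sorted cords (fun x => PySem.List.pyGetD x 1 0) false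
  let sx := @PySem.List.sorted _ _ List.instLinearOrder.toLT LinearOrder.toDecidableLT cords (fun x => x) false
  let tr := PySem.List.pyGetD (PySem.List.pyGetD sy (-1) []) 1 0
          - PySem.List.pyGetD (PySem.List.pyGetD sy 0 []) 1 0 + 1
  let tc := PySem.List.pyGetD (PySem.List.pyGetD sx (-1) []) 0 0
          - PySem.List.pyGetD (PySem.List.pyGetD sx 0 []) 0 0 + 1
  let maxy := PySem.List.pyGetD (PySem.List.pyGetD sy (-1) []) 1 0
  let minx := PySem.List.pyGetD (PySem.List.pyGetD sx 0 []) 0 0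
  let finalGraph0 : List (List Char) :=
    (PySem.List.pyRange 0 tr 1).map (fun _ => (PySem.List.pyRange 0 tc 1).map (fun _ => '.'))
  let reordered := cords.map (fun x =>
    [|PySem.List.pyGetD x 1 0 - maxy|, PySem.List.pyGetD x 0 0 - minx])
  let finalGraph := reordered.foldl (fun g rc =>
    gridStep g (PySem.List.pyGetD rc 0 0) (PySem.List.pyGetD rc 1 0)) finalGraph0
  -- final loop replaces each row by ''.join(row); rows hold single chars, so the join is String.ofList
  finalGraph.map (fun row => String.ofList row)

-- ===== PORT B =====
-- '.' * n  (Python: empty string for n ≤ 0)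
def dotsRep (n : Int) : List Char := List.replicate n.toNat '.'

def express_cords_in_graph_alt (cords : List (List Int)) : List String :=
  let xs := cords.map (fun p => PySem.List.pyGetD p 0 0)
  let ys := cords.map (fun p => PySem.List.pyGetD p 1 0)
  let minx := (PySem.List.min? xs (fun v => v)).getD 0   -- min/max raise only on [], excluded by Pre_
  let maxx := (PySem.List.max? xs (fun v => v)).getD 0
  let miny := (PySem.List.min? ys (fun v => v)).getD 0
  let maxy := (PySem.List.max? ys (fun v => v)).getD 0
  let width := maxx - minx + 1
  -- by_row.setdefault(maxy - p[1], set()).add(p[0] - minx)  ==  d[k] = d.get(k, set()).add(v)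
  let byRow : PySem.Dict Int (PySem.Set Int) :=
    cords.foldl (fun d p =>
      d.modify (maxy - PySem.List.pyGetD p 1 0) PySem.Set.empty
        (fun s => PySem.Set.add s (PySem.List.pyGetD p 0 0 - minx))) PySem.Dict.empty
  (PySem.List.pyRange 0 (maxy - miny + 1) 1).map (fun r =>
    let cols := PySem.List.sorted (byRow.getD r PySem.Set.empty) (fun v => v) false
    let res := cols.foldl (fun (a : List Char × Int) c =>
      (a.1 ++ dotsRep (c - a.2 - 1) ++ ['*'], c)) (([] : List Char), -1)
    String.ofList (res.1 ++ dotsRep (width - res.2 - 1)))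

-- ===== PRECONDITION & SPEC =====
-- Pre_ excludes exactly the inputs where A raises: the empty list (IndexError on sorted(...)[-1])
-- and inputs containing a point with fewer than two coordinates (IndexError on x[1] / x[0]).
def Pre_express_cords_in_graph (cords : List (List Int)) : Prop :=
  cords ≠ [] ∧ ∀ p ∈ cords, 2 ≤ p.length
instance (cords : List (List Int)) : Decidable (Pre_express_cords_in_graph cords) := by
  unfold Pre_express_cords_in_graph; infer_instance
def pvWitness_express_cords_in_graph : List (List Int) := [[0, 0], [2, 1]]

def Spec_express_cords_in_graph (cords : List (List Int)) (out : List String) : Prop := out = express_cords_in_graph_alt cords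
instance (cords : List (List Int)) (out : List String) : Decidable (Spec_express_cords_in_graph cords out) := by unfold Spec_express_cords_in_graph; infer_instance

-- ===== CLAIM (what is proved, stated in full; the proofs are below) =====
def Claim_equal_express_cords_in_graph : Prop := ∀ (cords : List (List Int)), Dom_express_cords_in_graph cords → Pre_express_cords_in_graph cords → Spec_express_cords_in_graph cords (express_cords_in_graph cords)

-- ===== LEMMAS AND PROOFS =====

-- head comparison under the lexicographic order: a ≤ b (both nonempty) gives a[0] ≤ b[0]
lemma lex_le_getZero (a b : List Int) (ha : a ≠ []) (hb : b ≠ [])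
    (h : @LE.le _ List.instLinearOrder.toLE a b) :
    PySem.List.pyGetD a 0 0 ≤ PySem.List.pyGetD b 0 0 := by
  match a, b with
  | x :: as, y :: bs =>
    simp only [PySem.List.pyGetD_zero_cons]
    by_contra hxy
    push Not at hxy
    have : @LT.lt (List Int) List.instLinearOrder.toLT (y :: bs) (x :: as) := List.Lex.rel hxy
    exact absurd this (not_lt_of_ge h)

-- the last element of sorted(l, key) is in l and its key bounds all keys from above
lemma sorted_getLast_key_max {α κ : Type} [LinearOrder κ] (l : List α) (key : α → κ) (e : α)
    (h : l ≠ []) :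
    PySem.List.pyGetD (PySem.List.sorted l key false) (-1) e ∈ l ∧
    ∀ p ∈ l, key p ≤ key (PySem.List.pyGetD (PySem.List.sorted l key false) (-1) e) := by
  have hs : PySem.List.sorted l key false ≠ [] := by
    rw [Ne, PySem.List.sorted_eq_nil_iff]; exact h
  rw [PySem.List.pyGetD_neg_one _ _ hs]
  constructor
  · exact (PySem.List.mem_sorted _ _ _ _).mp (List.getLast_mem hs)
  · intro p hp
    have hp' : p ∈ PySem.List.sorted l key false := (PySem.List.mem_sorted _ _ _ _).mpr hp
    obtain ⟨i, hi, rfl⟩ := List.mem_iff_getElem.mp hp'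
    rw [List.getLast_eq_getElem]
    exact PySem.List.key_sorted_getElem_mono l key (by omega) (by omega)

-- the first element of sorted(l, key) is in l and its key bounds all keys from below
lemma sorted_head_key_min {α κ : Type} [LinearOrder κ] (l : List α) (key : α → κ) (e : α)
    (h : l ≠ []) :
    PySem.List.pyGetD (PySem.List.sorted l key false) 0 e ∈ l ∧
    ∀ p ∈ l, key (PySem.List.pyGetD (PySem.List.sorted l key false) 0 e) ≤ key p := by
  have hs : PySem.List.sorted l key false ≠ [] := by
    rw [Ne, PySem.List.sorted_eq_nil_iff]; exact h
  obtain ⟨m, t, hmt⟩ := List.exists_cons_of_ne_nil hs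
  rw [hmt, PySem.List.pyGetD_zero_cons]
  constructor
  · exact (PySem.List.mem_sorted _ _ _ _).mp (hmt ▸ List.mem_cons_self)
  · exact PySem.List.key_head_sorted_le l key hmt

-- max(l.map key) is the key of any member whose key is an upper bound
lemma max?_map_eq {α : Type} (l : List α) (key : α → Int) (m : α) (hm : m ∈ l)
    (hub : ∀ p ∈ l, key p ≤ key m) :
    PySem.List.max? (l.map key) (fun v => v) = some (key m) := by
  have hne : l.map key ≠ [] := by simp; rintro rfl; simp at hm
  obtain ⟨M, hM⟩ := Option.ne_none_iff_exists'.mp (fun hn => hne ((PySem.List.max?_eq_none_iff (l.map key) (fun v => v)).mp hn))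
  rw [hM]
  have hMmem := PySem.List.max?_mem hM
  obtain ⟨p₀, hp₀, rfl⟩ := List.mem_map.mp hMmem
  have h1 : key p₀ ≤ key m := hub p₀ hp₀
  have h2 := PySem.List.max?_isMax hM (key m) (List.mem_map.mpr ⟨m, hm, rfl⟩)
  simp at h2 ⊢
  omega

lemma min?_map_eq {α : Type} (l : List α) (key : α → Int) (m : α) (hm : m ∈ l)
    (hlb : ∀ p ∈ l, key m ≤ key p) :
    PySem.List.min? (l.map key) (fun v => v) = some (key m) := by
  have hne : l.map key ≠ [] := by simp; rintro rfl; simp at hm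
  obtain ⟨M, hM⟩ := Option.ne_none_iff_exists'.mp (fun hn => hne ((PySem.List.min?_eq_none_iff (l.map key) (fun v => v)).mp hn))
  rw [hM]
  have hMmem := PySem.List.min?_mem hM
  obtain ⟨p₀, hp₀, rfl⟩ := List.mem_map.mp hMmem
  have h1 := hlb p₀ hp₀
  have h2 := PySem.List.min?_isMin hM (key m) (List.mem_map.mpr ⟨m, hm, rfl⟩)
  simp at h2 ⊢
  omega

-- one `final_graph[r][c] = '*'` step: shape preserved, exactly one cell becomes '*'
lemma gridStep_cell (g : List (List Char)) (r c : Int) (C : Nat)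
    (hrect : ∀ row ∈ g, row.length = C)
    (hq : 0 ≤ r ∧ r < (g.length : Int) ∧ 0 ≤ c ∧ c < (C : Int)) :
    (gridStep g r c).length = g.length ∧
    (∀ row ∈ gridStep g r c, row.length = C) ∧
    ∀ i j : Nat, ((gridStep g r c).getD i []).getD j '.' =
      if r = (i : Int) ∧ c = (j : Int) then '*' else (g.getD i []).getD j '.' := by
  obtain ⟨h1, h2, h3, h4⟩ := hq
  have hn : r.toNat < g.length := by omega
  have hm : c.toNat < C := by omega
  have hrow : PySem.List.pyGetD g r [] = g[r.toNat] := by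
    rw [PySem.List.pyGetD_eq_getElem _ _ h1 (by simpa using h2)]
  have hrl : g[r.toNat].length = C := hrect _ (List.getElem_mem hn)
  have hstep : gridStep g r c = g.set r.toNat (g[r.toNat].set c.toNat '*') := by
    rw [gridStep, hrow, PySem.List.pySetD_of_nonneg _ _ h3, PySem.List.pySetD_of_nonneg _ _ h1]
  rw [hstep]
  refine ⟨by simp, ?_, ?_⟩
  · intro row hrowmem
    rcases List.mem_or_eq_of_mem_set hrowmem with h | rfl
    · exact hrect _ h
    · simp [hrl]
  · intro i j
    simp only [List.getD_eq_getElem?_getD]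
    by_cases hi : i = r.toNat
    · subst hi
      rw [List.getElem?_set_self hn, Option.getD_some]
      by_cases hj : j = c.toNat
      · subst hj
        rw [List.getElem?_set_self (by omega), Option.getD_some, if_pos ⟨by omega, by omega⟩]
      · rw [List.getElem?_set_ne (by omega), if_neg (by omega), List.getElem?_eq_getElem hn, Option.getD_some]
    · rw [List.getElem?_set_ne (by omega), if_neg (by omega)]

-- the grid fold: shape is preserved and a cell is '*' iff some coordinate pair hits it
lemma gridFold_spec {α : Type} (fr fc : α → Int) (l : List α) (g : List (List Char)) (C : Nat)
    (hrect : ∀ row ∈ g, row.length = C)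
    (hb : ∀ p ∈ l, 0 ≤ fr p ∧ fr p < (g.length : Int) ∧ 0 ≤ fc p ∧ fc p < (C : Int)) :
    (l.foldl (fun g' p => gridStep g' (fr p) (fc p)) g).length = g.length ∧
    (∀ row ∈ l.foldl (fun g' p => gridStep g' (fr p) (fc p)) g, row.length = C) ∧
    ∀ i j : Nat, i < g.length → j < C →
      (((l.foldl (fun g' p => gridStep g' (fr p) (fc p)) g).getD i []).getD j '.') =
        if ∃ p ∈ l, fr p = (i : Int) ∧ fc p = (j : Int) then '*'
        else ((g.getD i []).getD j '.') := by
  induction l generalizing g with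
  | nil => exact ⟨rfl, hrect, by simp⟩
  | cons q t ih =>
    obtain ⟨hlen1, hrect1, hcell1⟩ := gridStep_cell g (fr q) (fc q) C hrect (hb q List.mem_cons_self)
    have hb1 : ∀ p ∈ t, 0 ≤ fr p ∧ fr p < ((gridStep g (fr q) (fc q)).length : Int) ∧
        0 ≤ fc p ∧ fc p < (C : Int) := by
      intro p hp
      rw [hlen1]
      exact hb p (List.mem_cons_of_mem _ hp)
    obtain ⟨ihlen, ihrect, ihcell⟩ := ih (gridStep g (fr q) (fc q)) hrect1 hb1
    simp only [List.foldl_cons]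
    refine ⟨by rw [ihlen, hlen1], ihrect, ?_⟩
    intro i j hi hj
    rw [ihcell i j (by rwa [hlen1]) hj, hcell1 i j]
    by_cases ht : ∃ p ∈ t, fr p = (i : Int) ∧ fc p = (j : Int)
    · rw [if_pos ht, if_pos]
      obtain ⟨p, hp, h⟩ := ht
      exact ⟨p, List.mem_cons_of_mem _ hp, h⟩
    · rw [if_neg ht]
      by_cases hq : fr q = (i : Int) ∧ fc q = (j : Int)
      · rw [if_pos hq, if_pos ⟨q, List.mem_cons_self, hq⟩]
      · rw [if_neg hq, if_neg]
        rintro ⟨p, hp, h⟩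
        rcases List.mem_cons.mp hp with rfl | hmem
        · exact hq h
        · exact ht ⟨p, hmem, h⟩

-- the row-grouping fold of B: the bucket of row r holds exactly the columns of r's points, no duplicates
lemma byRow_getD_spec {α : Type} (fr fc : α → Int) (l : List α) (d : PySem.Dict Int (PySem.Set Int))
    (hnd : ∀ r : Int, (d.getD r PySem.Set.empty).Nodup) :
    ∀ r : Int,
      ((l.foldl (fun d' p => d'.modify (fr p) PySem.Set.empty
          (fun s => PySem.Set.add s (fc p))) d).getD r PySem.Set.empty).Nodup ∧
      ∀ c : Int, c ∈ (l.foldl (fun d' p => d'.modify (fr p) PySem.Set.empty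
          (fun s => PySem.Set.add s (fc p))) d).getD r PySem.Set.empty ↔
        c ∈ d.getD r PySem.Set.empty ∨ ∃ p ∈ l, fr p = r ∧ fc p = c := by
  induction l generalizing d with
  | nil => intro r; exact ⟨hnd r, by simp⟩
  | cons q t ih =>
    intro r
    have hnd1 : ∀ r : Int, ((d.modify (fr q) PySem.Set.empty
        (fun s => PySem.Set.add s (fc q))).getD r PySem.Set.empty).Nodup := by
      intro r'
      rw [PySem.Dict.getD_modify]
      split_ifs
      · exact PySem.Set.nodup_add _ _ (hnd _)
      · exact hnd r'
    obtain ⟨ihnd, ihmem⟩ := ih (d.modify (fr q) PySem.Set.empty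
        (fun s => PySem.Set.add s (fc q))) hnd1 r
    refine ⟨ihnd, ?_⟩
    intro c
    rw [List.foldl_cons]
    rw [ihmem c, PySem.Dict.getD_modify]
    by_cases hr : r = fr q
    · subst hr
      rw [if_pos rfl, PySem.Set.mem_add]
      constructor
      · rintro ((h | rfl) | ⟨p, hp, h⟩)
        · exact Or.inl h
        · exact Or.inr ⟨q, List.mem_cons_self, rfl, rfl⟩
        · exact Or.inr ⟨p, List.mem_cons_of_mem _ hp, h⟩
      · rintro (h | ⟨p, hp, h1, h2⟩)
        · exact Or.inl (Or.inl h)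
        · rcases List.mem_cons.mp hp with rfl | hmem
          · exact Or.inl (Or.inr h2.symm)
          · exact Or.inr ⟨p, hmem, h1, h2⟩
    · rw [if_neg hr]
      constructor
      · rintro (h | ⟨p, hp, h⟩)
        · exact Or.inl h
        · exact Or.inr ⟨p, List.mem_cons_of_mem _ hp, h⟩
      · rintro (h | ⟨p, hp, h1, h2⟩)
        · exact Or.inl h
        · rcases List.mem_cons.mp hp with rfl | hmem
          · exact absurd h1.symm hr
          · exact Or.inr ⟨p, hmem, h1, h2⟩

-- the run-length row builder over a strictly increasing column list equals the per-cell map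
lemma runRow (cols : List Int) (prev width : Int) (acc : List Char)
    (hsorted : cols.Pairwise (· < ·)) (hlb : ∀ c ∈ cols, prev < c) (hub : ∀ c ∈ cols, c < width) :
    (cols.foldl (fun (a : List Char × Int) c =>
        (a.1 ++ dotsRep (c - a.2 - 1) ++ ['*'], c)) (acc, prev)).1 ++
      dotsRep (width - (cols.foldl (fun (a : List Char × Int) c =>
        (a.1 ++ dotsRep (c - a.2 - 1) ++ ['*'], c)) (acc, prev)).2 - 1)
    = acc ++ (PySem.List.pyRange (prev + 1) width 1).map
        (fun i => if i ∈ cols then '*' else '.') := by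
  induction cols generalizing acc prev with
  | nil =>
    simp only [List.foldl_nil, List.not_mem_nil, if_false]
    rw [List.map_const', PySem.List.length_pyRange_one, dotsRep]
    congr 2
    omega
  | cons c cs ih =>
    have hcub := hub c List.mem_cons_self
    have hclb := hlb c List.mem_cons_self
    have hcs_gt : ∀ x ∈ cs, c < x := by
      intro x hx; exact (List.pairwise_cons.mp hsorted).1 x hx
    have hsplit := PySem.List.pyRange_one_append (prev + 1) c width (by omega) (by omega)
    simp only [List.foldl_cons]
    rw [ih (acc := acc ++ dotsRep (c - prev - 1) ++ ['*']) (prev := c)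
        (List.pairwise_cons.mp hsorted).2 (fun x hx => hcs_gt x hx)
        (fun x hx => hub x (List.mem_cons_of_mem _ hx))]
    rw [hsplit, PySem.List.pyRange_one_cons (show c < width by omega)]
    simp only [List.map_append, List.map_cons]
    have hleft : ∀ i ∈ PySem.List.pyRange (prev + 1) c 1, (if i ∈ c :: cs then '*' else '.') = '.' := by
      intro i hi
      have hic := (PySem.List.mem_pyRange_one.mp hi).2
      rw [if_neg]
      simp only [List.mem_cons]
      rintro (rfl | hmem)
      · omega
      · exact absurd (hcs_gt i hmem) (by omega)
    have h1 : (if c ∈ c :: cs then '*' else '.') = '*' := if_pos List.mem_cons_self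
    have h2 : ∀ i ∈ PySem.List.pyRange (c + 1) width 1,
        (if i ∈ cs then '*' else '.') = (if i ∈ c :: cs then '*' else '.') := by
      intro i hi
      have hic := (PySem.List.mem_pyRange_one.mp hi).1
      simp only [List.mem_cons]
      refine if_congr ?_ rfl rfl
      constructor
      · exact Or.inr
      · rintro (rfl | h); omega; exact h
    rw [List.map_congr_left hleft, List.map_congr_left h2, h1,
        List.map_const', PySem.List.length_pyRange_one]
    have hdots : dotsRep (c - prev - 1) = List.replicate (c - (prev+1)).toNat '.' := by
      rw [dotsRep]; congr 1; omega
    rw [hdots]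
    simp

-- a sorted Nodup Int list is strictly increasing
lemma sorted_nodup_pairwise_lt (s : List Int) (hnd : s.Nodup) :
    (PySem.List.sorted s (fun v => v) false).Pairwise (· < ·) := by
  have hle := PySem.List.sorted_pairwise s (fun v => v)
  have hnd' : (PySem.List.sorted s (fun v => v) false).Nodup :=
    (PySem.List.sorted_perm s (fun v => v) false).nodup_iff.mpr hnd
  exact (hle.and hnd').imp (fun h => lt_of_le_of_ne h.1 h.2)

-- the heart: A's grid-building fold joined into strings equals B's run-length row construction
lemma main_core (cords : List (List Int)) (My my mx Mx : Int)
    (hY_ub : ∀ p ∈ cords, PySem.List.pyGetD p 1 0 ≤ My)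
    (hY_lb : ∀ p ∈ cords, my ≤ PySem.List.pyGetD p 1 0)
    (hX_ub : ∀ p ∈ cords, PySem.List.pyGetD p 0 0 ≤ Mx)
    (hX_lb : ∀ p ∈ cords, mx ≤ PySem.List.pyGetD p 0 0)
    (hmy : my ≤ My) (hmx : mx ≤ Mx) :
    ((cords.map (fun x => [|PySem.List.pyGetD x 1 0 - My|, PySem.List.pyGetD x 0 0 - mx])).foldl
        (fun g rc => gridStep g (PySem.List.pyGetD rc 0 0) (PySem.List.pyGetD rc 1 0))
        ((PySem.List.pyRange 0 (My - my + 1) 1).map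
          (fun _ => (PySem.List.pyRange 0 (Mx - mx + 1) 1).map (fun _ => '.')))).map
      (fun row => String.ofList row)
    = (PySem.List.pyRange 0 (My - my + 1) 1).map (fun r =>
        let cols := PySem.List.sorted
          ((cords.foldl (fun d p =>
            d.modify (My - PySem.List.pyGetD p 1 0) PySem.Set.empty
              (fun s => PySem.Set.add s (PySem.List.pyGetD p 0 0 - mx))) PySem.Dict.empty).getD r
            PySem.Set.empty) (fun v => v) false
        let res := cols.foldl (fun (a : List Char × Int) c =>
          (a.1 ++ dotsRep (c - a.2 - 1) ++ ['*'], c)) (([] : List Char), -1)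
        String.ofList (res.1 ++ dotsRep ((Mx - mx + 1) - res.2 - 1))) := by
  -- A's fold in canonical form
  rw [List.foldl_map]
  have hcongr := PySem.List.foldl_congr_mem'
    (l := cords)
    (init := (PySem.List.pyRange 0 (My - my + 1) 1).map
          (fun _ => (PySem.List.pyRange 0 (Mx - mx + 1) 1).map (fun _ => '.')))
    (f := fun acc y => gridStep acc
      (PySem.List.pyGetD [|PySem.List.pyGetD y 1 0 - My|, PySem.List.pyGetD y 0 0 - mx] 0 0)
      (PySem.List.pyGetD [|PySem.List.pyGetD y 1 0 - My|, PySem.List.pyGetD y 0 0 - mx] 1 0))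
    (g := fun acc y => gridStep acc (My - PySem.List.pyGetD y 1 0) (PySem.List.pyGetD y 0 0 - mx))
    (by
      intro y hy acc
      have h1 := hY_ub y hy
      simp [pysem] at h1 ⊢
      rw [abs_of_nonpos (by omega), neg_sub])
  rw [hcongr]
  have hrect : ∀ row ∈ (PySem.List.pyRange 0 (My - my + 1) 1).map
      (fun _ => (PySem.List.pyRange 0 (Mx - mx + 1) 1).map (fun _ => '.')),
      row.length = (Mx - mx + 1).toNat := by
    intro row hrow
    obtain ⟨r, _, rfl⟩ := List.mem_map.mp hrow
    simp [PySem.List.length_pyRange_one]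
  have hb : ∀ p ∈ cords,
      0 ≤ My - PySem.List.pyGetD p 1 0 ∧
      My - PySem.List.pyGetD p 1 0 < ((((PySem.List.pyRange 0 (My - my + 1) 1).map
        (fun _ => (PySem.List.pyRange 0 (Mx - mx + 1) 1).map (fun _ => '.'))).length : Int)) ∧
      0 ≤ PySem.List.pyGetD p 0 0 - mx ∧
      PySem.List.pyGetD p 0 0 - mx < (((Mx - mx + 1).toNat : Nat) : Int) := by
    intro p hp
    have h1 := hY_ub p hp; have h2 := hY_lb p hp
    have h3 := hX_ub p hp; have h4 := hX_lb p hp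
    simp only [List.length_map, PySem.List.length_pyRange_one]
    refine ⟨by omega, by omega, by omega, by omega⟩
  obtain ⟨hL, hRect, hCell⟩ := gridFold_spec
    (fun y => My - PySem.List.pyGetD y 1 0) (fun y => PySem.List.pyGetD y 0 0 - mx)
    cords _ _ hrect hb
  -- B's bucket of row r
  have hbuckets := byRow_getD_spec (fun y => My - PySem.List.pyGetD y 1 0)
    (fun y => PySem.List.pyGetD y 0 0 - mx) cords PySem.Dict.empty
    (by intro r; rw [PySem.Dict.getD_empty]; exact List.nodup_nil)
  apply List.ext_getElem
  · rw [List.length_map, hL, List.length_map, List.length_map,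
      PySem.List.length_pyRange_one]
  · intro i h1 h2
    rw [List.getElem_map, List.getElem_map, PySem.List.getElem_pyRange_one]
    obtain ⟨hbnd, hbmem⟩ := hbuckets ((0 : Int) + (i : Int))
    -- B's row i as a per-cell map
    have hcols_lt := sorted_nodup_pairwise_lt _ hbnd
    have hcols_mem : ∀ c, c ∈ PySem.List.sorted
        ((cords.foldl (fun d p =>
          d.modify (My - PySem.List.pyGetD p 1 0) PySem.Set.empty
            (fun s => PySem.Set.add s (PySem.List.pyGetD p 0 0 - mx))) PySem.Dict.empty).getD
          ((0 : Int) + (i : Int)) PySem.Set.empty) (fun v => v) false ↔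
        ∃ p ∈ cords, My - PySem.List.pyGetD p 1 0 = (0 : Int) + (i : Int) ∧
          PySem.List.pyGetD p 0 0 - mx = c := by
      intro c
      rw [PySem.List.mem_sorted, hbmem c, PySem.Dict.getD_empty]
      simp
    have hrun := runRow (PySem.List.sorted
        ((cords.foldl (fun d p =>
          d.modify (My - PySem.List.pyGetD p 1 0) PySem.Set.empty
            (fun s => PySem.Set.add s (PySem.List.pyGetD p 0 0 - mx))) PySem.Dict.empty).getD
          ((0 : Int) + (i : Int)) PySem.Set.empty) (fun v => v) false)
      (-1) (Mx - mx + 1) []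
      hcols_lt
      (by intro c hc
          obtain ⟨p, hp, _, rfl⟩ := (hcols_mem c).mp hc
          have := hX_lb p hp; omega)
      (by intro c hc
          obtain ⟨p, hp, _, rfl⟩ := (hcols_mem c).mp hc
          have := hX_ub p hp; omega)
    simp only [] at hrun ⊢
    rw [hrun]
    simp only [List.nil_append, neg_add_cancel]
    congr 1
    -- both sides are now maps over the column range; compare cell by cell
    have hiR : i < ((PySem.List.pyRange 0 (My - my + 1) 1).map
        (fun _ => (PySem.List.pyRange 0 (Mx - mx + 1) 1).map (fun _ => '.'))).length := by
      simpa [PySem.List.length_pyRange_one] using h2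
    apply List.ext_getElem
    · rw [hRect _ (List.getElem_mem _), List.length_map, PySem.List.length_pyRange_one]
      omega
    · intro j hj1 hj2
      have hjC : j < (Mx - mx + 1).toNat := by
        simpa [PySem.List.length_pyRange_one] using hj2
      rw [List.getElem_map, PySem.List.getElem_pyRange_one]
      have hgd : ∀ (F : List (List Char)) (hi : i < F.length) (hj : j < F[i].length),
          F[i][j] = ((F.getD i []).getD j '.') := by
        intro F hi hj
        rw [List.getD_eq_getElem?_getD, List.getD_eq_getElem?_getD,
          List.getElem?_eq_getElem hi, Option.getD_some, List.getElem?_eq_getElem hj,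
          Option.getD_some]
      rw [hgd _ (by simpa using h1) hj1, hCell i j (by simpa [PySem.List.length_pyRange_one] using h2) hjC]
      have hbase : (((PySem.List.pyRange 0 (My - my + 1) 1).map
          (fun _ => (PySem.List.pyRange 0 (Mx - mx + 1) 1).map (fun _ => '.'))).getD i []).getD j '.' = '.' := by
        simp only [List.getD_eq_getElem?_getD]
        rw [List.getElem?_eq_getElem hiR, Option.getD_some, List.getElem_map,
          List.getElem?_eq_getElem (by simp [PySem.List.length_pyRange_one]; omega),
          Option.getD_some, List.getElem_map]
      rw [hbase]
      refine if_congr ?_ rfl rfl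
      rw [hcols_mem ((0 : Int) + (j : Int))]
      constructor
      · rintro ⟨p, hp, hp1, hp2⟩
        exact ⟨p, hp, by omega, by omega⟩
      · rintro ⟨p, hp, hp1, hp2⟩
        exact ⟨p, hp, by omega, by omega⟩

-- ===== VERDICT (by name: the statement is the Claim_ definition above) =====
theorem express_cords_in_graph_spec : Claim_equal_express_cords_in_graph := by
  intro cords _hdom hpre
  obtain ⟨hne, hlen⟩ := hpre
  unfold Spec_express_cords_in_graph
  have hnenil : ∀ p ∈ cords, p ≠ [] := by
    intro p hp h
    have := hlen p hp
    rw [h] at this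
    simp at this
  obtain ⟨hYlast_mem, hYlast_ub⟩ :=
    sorted_getLast_key_max cords (fun x => PySem.List.pyGetD x 1 0) [] hne
  obtain ⟨hYhead_mem, hYhead_lb⟩ :=
    sorted_head_key_min cords (fun x => PySem.List.pyGetD x 1 0) [] hne
  obtain ⟨hXlast_mem, hXlast_ub⟩ :=
    @sorted_getLast_key_max (List Int) (List Int) List.instLinearOrder cords (fun x => x) [] hne
  obtain ⟨hXhead_mem, hXhead_lb⟩ :=
    @sorted_head_key_min (List Int) (List Int) List.instLinearOrder cords (fun x => x) [] hne
  have hfx_ub : ∀ p ∈ cords, PySem.List.pyGetD p 0 0 ≤ PySem.List.pyGetD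
      (PySem.List.pyGetD (@PySem.List.sorted _ _ List.instLinearOrder.toLT LinearOrder.toDecidableLT
        cords (fun x => x) false) (-1) []) 0 0 :=
    fun p hp => lex_le_getZero p _ (hnenil p hp) (hnenil _ hXlast_mem) (hXlast_ub p hp)
  have hfx_lb : ∀ p ∈ cords, PySem.List.pyGetD
      (PySem.List.pyGetD (@PySem.List.sorted _ _ List.instLinearOrder.toLT LinearOrder.toDecidableLT
        cords (fun x => x) false) 0 []) 0 0 ≤ PySem.List.pyGetD p 0 0 :=
    fun p hp => lex_le_getZero _ p (hnenil _ hXhead_mem) (hnenil p hp) (hXhead_lb p hp)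
  have hmaxyB := max?_map_eq cords (fun p => PySem.List.pyGetD p 1 0) _ hYlast_mem hYlast_ub
  have hminyB := min?_map_eq cords (fun p => PySem.List.pyGetD p 1 0) _ hYhead_mem hYhead_lb
  have hmaxxB := max?_map_eq cords (fun p => PySem.List.pyGetD p 0 0) _ hXlast_mem hfx_ub
  have hminxB := min?_map_eq cords (fun p => PySem.List.pyGetD p 0 0) _ hXhead_mem hfx_lb
  rw [express_cords_in_graph, express_cords_in_graph_alt]
  rw [hmaxyB, hminyB, hmaxxB, hminxB]
  simp only [Option.getD_some]
  exact main_core cords _ _ _ _ hYlast_ub hYhead_lb hfx_ub hfx_lb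
    (hYhead_lb _ hYlast_mem) (hfx_lb _ hXlast_mem)
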